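-- pv_equiv track=rewrite | github.com/mbrueckmann-mo/cigar_pricing_rating | famous_smoke_scraper.py | smart_parse_wrapper
-- ===== SOURCE A (Python) =====
-- def safe_str(value):
--     """Convert to stripped string or return None."""
--     if value is None:
--         return None
--     s = str(value).strip()
--     return s if s else None
--
-- WRAPPER_COLORS = [
--     "natural", "maduro", "oscuro", "claro", "double claro",
--     "ems", "sun grown", "sungrown", "colorado", "colorado claro",
--     "colorado maduro"
-- ]
--
-- WRAPPER_ORIGINS = [
--     "usa", "united states", "honduras", "nicaragua", "dominican",
--     "dominican republic", "mexico", "ecuador", "brazil", "cameroon",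
--     "panama", "costa rica"
-- ]
--
-- def smart_parse_wrapper(combined: str):
--     """
--     Smart parse a combined wrapper string like:
--     'Connecticut Broadleaf Maduro (USA)'
--     into (color, leaf, origin).
--     """
--     if not combined:
--         return None, None, None
--
--     text = combined.lower()
--
--     color = None
--     for c in sorted(WRAPPER_COLORS, key=len, reverse=True):
--         if c in text:
--             color = c.title()
--             break
--
--     origin = None
--     for o in sorted(WRAPPER_ORIGINS, key=len, reverse=True):
--         if o in text:
--             if o in ("usa", "united states"):
--                 origin = "USA"
--             elif o == "dominican":
--                 origin = "Dominican Republic"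
--             else:
--                 origin = o.title()
--             break
--
--     leaf_candidate = combined
--     if color:
--         leaf_candidate = leaf_candidate.replace(color, "", 1)
--     if origin:
--         leaf_candidate = leaf_candidate.replace(origin, "", 1)
--     leaf_candidate = leaf_candidate.replace("()", "").strip(" -,")
--
--     leaf = safe_str(leaf_candidate)
--
--     return color, leaf, origin
-- ===== SOURCE B (Python) =====
-- WRAPPER_COLORS = [
--     "natural", "maduro", "oscuro", "claro", "double claro",
--     "ems", "sun grown", "sungrown", "colorado", "colorado claro",
--     "colorado maduro"
-- ]
--
-- WRAPPER_ORIGINS = [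
--     "usa", "united states", "honduras", "nicaragua", "dominican",
--     "dominican republic", "mexico", "ecuador", "brazil", "cameroon",
--     "panama", "costa rica"
-- ]
--
--
-- def smart_parse_wrapper(combined: str):
--     """Parse 'Connecticut Broadleaf Maduro (USA)' into (color, leaf, origin).
--
--     Different strategy: one left-to-right scan over the lowered text records,
--     position by position, every keyword that starts there (a found-set built
--     with startswith, no per-keyword substring searches and no sorting); each
--     field is then chosen by a running-best fold over its keyword list in
--     original order, keeping the first longest found keyword."""
--     if not combined:
--         return None, None, None
--
--     text = combined.lower()
--
--     found = set()
--     for i in range(len(text)):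
--         for kw in WRAPPER_COLORS + WRAPPER_ORIGINS:
--             if text.startswith(kw, i):
--                 found.add(kw)
--
--     best_color = None
--     for c in WRAPPER_COLORS:
--         if c in found and (best_color is None or len(c) > len(best_color)):
--             best_color = c
--     color = best_color.title() if best_color is not None else None
--
--     best_origin = None
--     for o in WRAPPER_ORIGINS:
--         if o in found and (best_origin is None or len(o) > len(best_origin)):
--             best_origin = o
--     if best_origin is None:
--         origin = None
--     elif best_origin in ("usa", "united states"):
--         origin = "USA"
--     elif best_origin == "dominican":
--         origin = "Dominican Republic"
--     else:
--         origin = best_origin.title()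
--
--     leaf_candidate = combined
--     if color:
--         leaf_candidate = leaf_candidate.replace(color, "", 1)
--     if origin:
--         leaf_candidate = leaf_candidate.replace(origin, "", 1)
--     leaf_candidate = leaf_candidate.replace("()", "").strip(" -,")
--
--     leaf = leaf_candidate.strip() or None
--
--     return color, leaf, origin
-- ===== Notes on version B (the rewrite author's own statement) =====
-- stated objective: alternative
-- what changed: Instead of two sorted-by-length keyword scans with substring tests and an early break, B makes one positional pass over the lowered text collecting every keyword that starts at each index into a found-set (via startswith), then picks each field by a running-best fold over its keyword list in original order keeping the first longest found keyword; the leaf extraction is unchanged.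
import Mathlib
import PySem

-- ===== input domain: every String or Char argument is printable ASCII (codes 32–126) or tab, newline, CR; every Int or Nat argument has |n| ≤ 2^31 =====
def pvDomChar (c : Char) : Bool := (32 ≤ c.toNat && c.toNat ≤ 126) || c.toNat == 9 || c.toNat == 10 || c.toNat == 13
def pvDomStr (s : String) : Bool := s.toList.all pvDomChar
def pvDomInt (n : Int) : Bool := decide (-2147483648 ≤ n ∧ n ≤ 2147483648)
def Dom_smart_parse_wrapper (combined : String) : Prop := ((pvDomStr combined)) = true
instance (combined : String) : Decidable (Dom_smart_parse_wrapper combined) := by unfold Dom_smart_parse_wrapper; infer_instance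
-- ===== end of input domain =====

-- B replaces A's two sorted-by-length keyword scans by ONE positional scan of the text that collects
-- every keyword starting at each index into a found-set, followed by a running-best fold per list
-- (alternative decomposition; the leaf extraction is unchanged).

-- shared module constants and helpers (identical code in Source A and Source B)
def WRAPPER_COLORS : List String :=
  ["natural", "maduro", "oscuro", "claro", "double claro",
   "ems", "sun grown", "sungrown", "colorado", "colorado claro",
   "colorado maduro"]

def WRAPPER_ORIGINS : List String :=
  ["usa", "united states", "honduras", "nicaragua", "dominican",
   "dominican republic", "mexico", "ecuador", "brazil", "cameroon",
   "panama", "costa rica"]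

-- hand port of str.title(): exact on ASCII (a letter after a non-letter is uppercased, other letters lowercased)
def titleAux (prevAlpha : Bool) : List Char → List Char
  | [] => []
  | c :: t =>
    (if prevAlpha then PySem.Chars.lowerChar c else PySem.Chars.upperChar c) :: titleAux (PySem.Chars.isalpha c) t

def pyTitle (s : String) : String := String.ofList (titleAux false s.toList)

-- hand port of s.replace(old, "", 1) for nonempty old: drop the first occurrence (exact: Python removes the leftmost match only)
def replaceFirst (s old : String) : String :=
  let i := PySem.Chars.find s.toList old.toList
  if i = -1 then s
  else String.ofList (s.toList.take i.toNat ++ s.toList.drop (i.toNat + old.toList.length))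

-- the origin renaming if-chain (identical in both sources)
def remapOrigin (o : String) : String :=
  if o = "usa" ∨ o = "united states" then "USA"
  else if o = "dominican" then "Dominican Republic"
  else pyTitle o

-- the leaf_candidate / safe_str block (identical in both sources)
def leafOf (combined : String) (color origin : Option String) : Option String :=
  let l1 := match color with | some c => replaceFirst combined c | none => combined
  let l2 := match origin with | some o => replaceFirst l1 o | none => l1
  let l3 := PySem.Str.stripChars (PySem.Str.replace l2 "()" "") " -,"
  let s := PySem.Str.strip l3
  if s.toList = [] then none else some s

-- ===== PORT A =====
-- 'for c in sorted(WRAPPER_COLORS, key=len, reverse=True): if c in text: color = c.title(); break'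
def colorLoopA (text : String) : List String → Option String
  | [] => none
  | c :: rest => if PySem.Str.isIn c text then some (pyTitle c) else colorLoopA text rest

def originLoopA (text : String) : List String → Option String
  | [] => none
  | o :: rest => if PySem.Str.isIn o text then some (remapOrigin o) else originLoopA text rest

def smart_parse_wrapper (combined : String) : Option String × Option String × Option String :=
  if combined.toList = [] then (none, none, none)
  else
    let text := PySem.Str.lower combined
    let color := colorLoopA text (PySem.List.sorted WRAPPER_COLORS (fun s => PySem.Str.len s) true)
    let origin := originLoopA text (PySem.List.sorted WRAPPER_ORIGINS (fun s => PySem.Str.len s) true)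
    (color, leafOf combined color origin, origin)

-- ===== PORT B =====
-- 'found = set(); for i in range(len(text)): for kw in COLORS+ORIGINS: if text.startswith(kw, i): found.add(kw)'
-- text.startswith(kw, i) with 0 ≤ i is ported by hand as 'kw is a prefix of text[i:]' — exact for 0 ≤ i < len(text)
def scanFound (text : List Char) : PySem.Set String :=
  (PySem.List.pyRange 0 (text.length : Int)).foldl
    (fun found i =>
      (WRAPPER_COLORS ++ WRAPPER_ORIGINS).foldl
        (fun fd kw =>
          if PySem.Chars.startswith (text.drop i.toNat) kw.toList then PySem.Set.add fd kw else fd)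
        found)
    PySem.Set.empty

-- 'best = None; for c in kws: if c in found and (best is None or len(c) > len(best)): best = c'
def bestKw (found : PySem.Set String) (kws : List String) : Option String :=
  kws.foldl
    (fun best c =>
      if PySem.Set.contains found c &&
         (match best with
          | none => true
          | some b => decide (PySem.Str.len b < PySem.Str.len c))
      then some c else best)
    none

def smart_parse_wrapper_alt (combined : String) : Option String × Option String × Option String :=
  if combined.toList = [] then (none, none, none)
  else
    let text := PySem.Str.lower combined
    let found := scanFound text.toList
    let color := (bestKw found WRAPPER_COLORS).map pyTitle
    let origin := (bestKw found WRAPPER_ORIGINS).map remapOrigin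
    (color, leafOf combined color origin, origin)

-- ===== PRECONDITION & SPEC =====
def Spec_smart_parse_wrapper (combined : String) (out : Option String × Option String × Option String) : Prop := out = smart_parse_wrapper_alt combined
instance (combined : String) (out : Option String × Option String × Option String) : Decidable (Spec_smart_parse_wrapper combined out) := by unfold Spec_smart_parse_wrapper; infer_instance

-- ===== CLAIM =====
def Claim_equal_smart_parse_wrapper : Prop := ∀ (combined : String), Dom_smart_parse_wrapper combined → Spec_smart_parse_wrapper combined (smart_parse_wrapper combined)

-- ===== LEMMAS AND PROOFS =====

-- membership in the inner per-position fold
lemma mem_inner_fold (p : String → Bool) (kws : List String) (fd : PySem.Set String) (x : String) :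
    x ∈ kws.foldl (fun fd kw => if p kw then PySem.Set.add fd kw else fd) fd ↔
      x ∈ fd ∨ (x ∈ kws ∧ p x = true) := by
  induction kws generalizing fd with
  | nil => simp
  | cons k t ih =>
    simp only [List.foldl_cons]
    by_cases hp : p k = true
    · rw [if_pos hp, ih]
      simp only [PySem.Set.mem_add, List.mem_cons]
      constructor
      · rintro ((h | rfl) | ⟨hm, hx⟩)
        · exact Or.inl h
        · exact Or.inr ⟨Or.inl rfl, hp⟩
        · exact Or.inr ⟨Or.inr hm, hx⟩
      · rintro (h | ⟨(rfl | hm), hx⟩)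
        · exact Or.inl (Or.inl h)
        · exact Or.inl (Or.inr rfl)
        · exact Or.inr ⟨hm, hx⟩
    · rw [if_neg hp, ih]
      simp only [List.mem_cons]
      constructor
      · rintro (h | ⟨hm, hx⟩)
        · exact Or.inl h
        · exact Or.inr ⟨Or.inr hm, hx⟩
      · rintro (h | ⟨(rfl | hm), hx⟩)
        · exact Or.inl h
        · exact (hp hx).elim
        · exact Or.inr ⟨hm, hx⟩

-- membership in the whole positional scan
lemma mem_scan_fold (is : List Int) (kws : List String) (p : Int → String → Bool)
    (s : PySem.Set String) (x : String) :
    x ∈ is.foldl (fun fd i => kws.foldl (fun fd kw => if p i kw then PySem.Set.add fd kw else fd) fd) s ↔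
      x ∈ s ∨ (x ∈ kws ∧ ∃ i ∈ is, p i x = true) := by
  induction is generalizing s with
  | nil => simp
  | cons i t ih =>
    simp only [List.foldl_cons, ih, mem_inner_fold]
    constructor
    · rintro ((h | ⟨hm, hp⟩) | ⟨hm, j, hj, hp⟩)
      · exact Or.inl h
      · exact Or.inr ⟨hm, i, by simp, hp⟩
      · exact Or.inr ⟨hm, j, by simp [hj], hp⟩
    · rintro (h | ⟨hm, j, hj, hp⟩)
      · exact Or.inl (Or.inl h)
      · rcases List.mem_cons.mp hj with rfl | hj
        · exact Or.inl (Or.inr ⟨hm, hp⟩)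
        · exact Or.inr ⟨hm, j, hj, hp⟩

-- the found-set contains a (nonempty) keyword of the lists exactly when it occurs in the text
lemma contains_scanFound (textL : List Char) (kw : String)
    (hmem : kw ∈ WRAPPER_COLORS ++ WRAPPER_ORIGINS) (hne : kw.toList ≠ []) :
    PySem.Set.contains (scanFound textL) kw = PySem.Chars.isIn kw.toList textL := by
  have hmemiff :
      kw ∈ scanFound textL ↔ PySem.Chars.isIn kw.toList textL = true := by
    unfold scanFound
    rw [mem_scan_fold]
    rw [← PySem.Chars.exists_prefix_drop_iff_isIn]
    constructor
    · rintro (h | ⟨-, i, hi, hp⟩)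
      · simp [PySem.Set.empty] at h
      · exact ⟨i.toNat, (PySem.Chars.startswith_iff _ _).mp hp⟩
    · rintro ⟨j, hj⟩
      have hjlt : j < textL.length := by
        by_contra hge
        have : textL.drop j = [] := List.drop_eq_nil_of_le (by omega)
        rw [this] at hj
        exact hne (List.prefix_nil.mp hj)
      refine Or.inr ⟨hmem, (j : Int), ?_, ?_⟩
      · exact PySem.List.mem_pyRange_one.mpr ⟨by omega, by exact_mod_cast hjlt⟩
      · rw [PySem.Chars.startswith_iff]
        simpa using hj
  cases h : PySem.Chars.isIn kw.toList textL
  · apply Bool.eq_false_iff.mpr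
    intro hc
    have hm := (PySem.Set.contains_iff _ _).mp hc
    rw [hmemiff, h] at hm
    exact Bool.false_ne_true hm
  · exact (PySem.Set.contains_iff _ _).mpr (hmemiff.mpr h)

-- proof-only views of the two loops over (condition, keyword) pairs
def firstHitF (f : String → String) : List (Bool × String) → Option String
  | [] => none
  | (b, c) :: t => if b then some (f c) else firstHitF f t

def runBestP : Option String → List (Bool × String) → Option String
  | best, [] => best
  | best, (b, c) :: t =>
      runBestP
        (if b && (match best with
                  | none => true
                  | some bb => decide (PySem.Str.len bb < PySem.Str.len c))
         then some c else best) t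

lemma foldl_eq_runBestP (found : PySem.Set String) (kws : List String) (best : Option String) :
    kws.foldl
      (fun best c =>
        if PySem.Set.contains found c &&
           (match best with
            | none => true
            | some b => decide (PySem.Str.len b < PySem.Str.len c))
        then some c else best) best
      = runBestP best (kws.map (fun c => (PySem.Set.contains found c, c))) := by
  induction kws generalizing best with
  | nil => rfl
  | cons c t ih =>
    simp only [List.foldl_cons, List.map_cons, runBestP]
    exact ih _

lemma color_eq (text : String) :
    colorLoopA text (PySem.List.sorted WRAPPER_COLORS (fun s => PySem.Str.len s) true)
      = (bestKw (scanFound text.toList) WRAPPER_COLORS).map pyTitle := by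
  have hs : PySem.List.sorted WRAPPER_COLORS (fun s => PySem.Str.len s) true
      = ["colorado maduro", "colorado claro", "double claro", "sun grown", "sungrown",
         "colorado", "natural", "maduro", "oscuro", "claro", "ems"] := by decide
  rw [hs]
  have hc : ∀ kw ∈ WRAPPER_COLORS,
      PySem.Set.contains (scanFound text.toList) kw = PySem.Chars.isIn kw.toList text.toList := by
    intro kw hkw
    exact contains_scanFound text.toList kw (List.mem_append_left _ hkw)
      (by fin_cases hkw <;> decide)
  have hA : colorLoopA text
      ["colorado maduro", "colorado claro", "double claro", "sun grown", "sungrown",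
       "colorado", "natural", "maduro", "oscuro", "claro", "ems"]
      = firstHitF pyTitle
          [(PySem.Str.isIn "colorado maduro" text, "colorado maduro"),
           (PySem.Str.isIn "colorado claro" text, "colorado claro"),
           (PySem.Str.isIn "double claro" text, "double claro"),
           (PySem.Str.isIn "sun grown" text, "sun grown"),
           (PySem.Str.isIn "sungrown" text, "sungrown"),
           (PySem.Str.isIn "colorado" text, "colorado"),
           (PySem.Str.isIn "natural" text, "natural"),
           (PySem.Str.isIn "maduro" text, "maduro"),
           (PySem.Str.isIn "oscuro" text, "oscuro"),
           (PySem.Str.isIn "claro" text, "claro"),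
           (PySem.Str.isIn "ems" text, "ems")] := rfl
  rw [hA]
  unfold bestKw
  rw [foldl_eq_runBestP]
  simp only [WRAPPER_COLORS, List.map_cons, List.map_nil]
  rw [hc "natural" (by decide), hc "maduro" (by decide), hc "oscuro" (by decide),
      hc "claro" (by decide), hc "double claro" (by decide), hc "ems" (by decide),
      hc "sun grown" (by decide), hc "sungrown" (by decide), hc "colorado" (by decide),
      hc "colorado claro" (by decide), hc "colorado maduro" (by decide)]
  simp only [PySem.Str.isIn_eq]
  generalize PySem.Chars.isIn "natural".toList text.toList = b1
  generalize PySem.Chars.isIn "maduro".toList text.toList = b2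
  generalize PySem.Chars.isIn "oscuro".toList text.toList = b3
  generalize PySem.Chars.isIn "claro".toList text.toList = b4
  generalize PySem.Chars.isIn "double claro".toList text.toList = b5
  generalize PySem.Chars.isIn "ems".toList text.toList = b6
  generalize PySem.Chars.isIn "sun grown".toList text.toList = b7
  generalize PySem.Chars.isIn "sungrown".toList text.toList = b8
  generalize PySem.Chars.isIn "colorado".toList text.toList = b9
  generalize PySem.Chars.isIn "colorado claro".toList text.toList = b10
  generalize PySem.Chars.isIn "colorado maduro".toList text.toList = b11
  revert b1 b2 b3 b4 b5 b6 b7 b8 b9 b10 b11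
  decide

set_option maxHeartbeats 1600000 in
lemma origin_eq (text : String) :
    originLoopA text (PySem.List.sorted WRAPPER_ORIGINS (fun s => PySem.Str.len s) true)
      = (bestKw (scanFound text.toList) WRAPPER_ORIGINS).map remapOrigin := by
  have hs : PySem.List.sorted WRAPPER_ORIGINS (fun s => PySem.Str.len s) true
      = ["dominican republic", "united states", "costa rica", "nicaragua", "dominican",
         "honduras", "cameroon", "ecuador", "mexico", "brazil", "panama", "usa"] := by decide
  rw [hs]
  have hc : ∀ kw ∈ WRAPPER_ORIGINS,
      PySem.Set.contains (scanFound text.toList) kw = PySem.Chars.isIn kw.toList text.toList := by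
    intro kw hkw
    exact contains_scanFound text.toList kw (List.mem_append_right _ hkw)
      (by fin_cases hkw <;> decide)
  have hA : originLoopA text
      ["dominican republic", "united states", "costa rica", "nicaragua", "dominican",
       "honduras", "cameroon", "ecuador", "mexico", "brazil", "panama", "usa"]
      = firstHitF remapOrigin
          [(PySem.Str.isIn "dominican republic" text, "dominican republic"),
           (PySem.Str.isIn "united states" text, "united states"),
           (PySem.Str.isIn "costa rica" text, "costa rica"),
           (PySem.Str.isIn "nicaragua" text, "nicaragua"),
           (PySem.Str.isIn "dominican" text, "dominican"),
           (PySem.Str.isIn "honduras" text, "honduras"),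
           (PySem.Str.isIn "cameroon" text, "cameroon"),
           (PySem.Str.isIn "ecuador" text, "ecuador"),
           (PySem.Str.isIn "mexico" text, "mexico"),
           (PySem.Str.isIn "brazil" text, "brazil"),
           (PySem.Str.isIn "panama" text, "panama"),
           (PySem.Str.isIn "usa" text, "usa")] := rfl
  rw [hA]
  unfold bestKw
  rw [foldl_eq_runBestP]
  simp only [WRAPPER_ORIGINS, List.map_cons, List.map_nil]
  rw [hc "usa" (by decide), hc "united states" (by decide), hc "honduras" (by decide),
      hc "nicaragua" (by decide), hc "dominican" (by decide), hc "dominican republic" (by decide),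
      hc "mexico" (by decide), hc "ecuador" (by decide), hc "brazil" (by decide),
      hc "cameroon" (by decide), hc "panama" (by decide), hc "costa rica" (by decide)]
  simp only [PySem.Str.isIn_eq]
  generalize PySem.Chars.isIn "usa".toList text.toList = b1
  generalize PySem.Chars.isIn "united states".toList text.toList = b2
  generalize PySem.Chars.isIn "honduras".toList text.toList = b3
  generalize PySem.Chars.isIn "nicaragua".toList text.toList = b4
  generalize PySem.Chars.isIn "dominican".toList text.toList = b5
  generalize PySem.Chars.isIn "dominican republic".toList text.toList = b6
  generalize PySem.Chars.isIn "mexico".toList text.toList = b7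
  generalize PySem.Chars.isIn "ecuador".toList text.toList = b8
  generalize PySem.Chars.isIn "brazil".toList text.toList = b9
  generalize PySem.Chars.isIn "cameroon".toList text.toList = b10
  generalize PySem.Chars.isIn "panama".toList text.toList = b11
  generalize PySem.Chars.isIn "costa rica".toList text.toList = b12
  revert b1 b2 b3 b4 b5 b6 b7 b8 b9 b10 b11 b12
  decide

-- ===== VERDICT =====
theorem smart_parse_wrapper_spec : Claim_equal_smart_parse_wrapper := by
  intro combined _
  unfold Spec_smart_parse_wrapper smart_parse_wrapper smart_parse_wrapper_alt
  split
  · rfl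
  · simp only [color_eq, origin_eq]
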